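-- pv_equiv track=rewrite | github.com/IsahyPost/ML_final_project | 3a.py | get_pixels_in_frame
-- ===== SOURCE A (Python) =====
-- def get_pixels_in_frame(image, x, y,  rec_size):
--     """
--     Returns a list of all the pixels in the frame of the rectangle that surrounds
--     the pixel at (x, y) in the given image.
--     """
--     x1, y1, x2, y2 = get_surrounding_rectangle(image, x, y, rec_size)
--     pixels = []
--     for i in range(y1, y2+1):
--         for j in range(x1, x2+1):
--             if i == y1 or i == y2 or j == x1 or j == x2:
--                 pixels.append([i,j])
--     return pixels
--
-- def get_surrounding_rectangle(image, x, y, rec_size):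
--     """
--     Returns the rectangle that surrounds the pixel at (x, y) in the given image.
--     The rectangle is represented as a tuple of (x1, y1, x2, y2), where (x1, y1) is
--     the top-left corner of the rectangle and (x2, y2) is the bottom-right corner.
--     """
--     width = len(image[0])
--     height = len(image)
--     # Calculate the coordinates of the top-left and bottom-right corners of the rectangle
--     x1 = max(0, x - rec_size)
--     y1 = max(0, y - rec_size)
--     x2 = min(width - rec_size, x + rec_size)
--     y2 = min(height - rec_size, y + rec_size)
--     return (x1, y1, x2, y2)
-- ===== SOURCE B (Python) =====
-- def get_pixels_in_frame(image, x, y, rec_size):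
--     """Emit only the perimeter pixels of the surrounding rectangle, in
--     row-major order, instead of scanning the whole rectangle and filtering."""
--     width = len(image[0])
--     height = len(image)
--     x1 = max(0, x - rec_size)
--     y1 = max(0, y - rec_size)
--     x2 = min(width - rec_size, x + rec_size)
--     y2 = min(height - rec_size, y + rec_size)
--     if y2 < y1 or x2 < x1:
--         return []
--     top = [[y1, j] for j in range(x1, x2 + 1)]
--     if y1 == y2:
--         return top
--     mid = []
--     for i in range(y1 + 1, y2):
--         mid.append([i, x1])
--         if x2 != x1:
--             mid.append([i, x2])
--     bottom = [[y2, j] for j in range(x1, x2 + 1)]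
--     return top + mid + bottom
-- ===== Notes on version B (the rewrite author's own statement) =====
-- stated objective: alternative
-- what changed: B emits the perimeter pixels directly (full top row, the two side pixels per interior row, full bottom row) in row-major order instead of scanning every cell of the rectangle and testing border membership.
-- outside the precondition, e.g. on get_pixels_in_frame([], 0, 0, 1): A raises IndexError, B raises IndexError
import Mathlib
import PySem

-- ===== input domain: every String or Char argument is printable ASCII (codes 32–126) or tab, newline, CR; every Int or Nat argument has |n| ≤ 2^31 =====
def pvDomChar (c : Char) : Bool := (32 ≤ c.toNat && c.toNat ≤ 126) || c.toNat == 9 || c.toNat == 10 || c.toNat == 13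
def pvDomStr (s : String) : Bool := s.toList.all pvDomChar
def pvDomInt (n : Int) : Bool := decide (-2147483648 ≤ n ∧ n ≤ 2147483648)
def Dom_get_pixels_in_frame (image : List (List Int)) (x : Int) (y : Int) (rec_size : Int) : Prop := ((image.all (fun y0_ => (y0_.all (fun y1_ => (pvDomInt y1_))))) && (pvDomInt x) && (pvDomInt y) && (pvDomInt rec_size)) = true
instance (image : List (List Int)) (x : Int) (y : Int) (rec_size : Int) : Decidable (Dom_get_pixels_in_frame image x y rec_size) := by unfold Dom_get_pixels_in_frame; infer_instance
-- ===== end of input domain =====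

-- B emits only the perimeter pixels (top row, side pairs, bottom row) instead of
-- scanning every cell of the rectangle and filtering; objective: alternative algorithm.

-- ===== PORT A =====
-- helper of A: get_surrounding_rectangle (image[0] ported with pyGet?; Pre_ excludes empty image, where Python raises IndexError)
def get_surrounding_rectangle (image : List (List Int)) (x : Int) (y : Int) (rec_size : Int) : Int × Int × Int × Int :=
  let width : Int := ((PySem.List.pyGet? image 0).getD []).length
  let height : Int := image.length
  (max 0 (x - rec_size), max 0 (y - rec_size), min (width - rec_size) (x + rec_size), min (height - rec_size) (y + rec_size))

def get_pixels_in_frame (image : List (List Int)) (x : Int) (y : Int) (rec_size : Int) : List (List Int) :=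
  match get_surrounding_rectangle image x y rec_size with
  | (x1, y1, x2, y2) =>
    (PySem.List.pyRange y1 (y2+1) 1).foldl (fun pixels i =>
      (PySem.List.pyRange x1 (x2+1) 1).foldl (fun pixels j =>
        if i == y1 || i == y2 || j == x1 || j == x2 then pixels ++ [[i, j]] else pixels) pixels) []

-- ===== PORT B =====
def get_pixels_in_frame_alt (image : List (List Int)) (x : Int) (y : Int) (rec_size : Int) : List (List Int) :=
  let width : Int := ((PySem.List.pyGet? image 0).getD []).length
  let height : Int := image.length
  let x1 := max 0 (x - rec_size)
  let y1 := max 0 (y - rec_size)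
  let x2 := min (width - rec_size) (x + rec_size)
  let y2 := min (height - rec_size) (y + rec_size)
  if y2 < y1 || x2 < x1 then []
  else
    let top := (PySem.List.pyRange x1 (x2+1) 1).map (fun j => [y1, j])
    if y1 == y2 then top
    else
      let mid := (PySem.List.pyRange (y1+1) y2 1).foldl (fun acc i =>
        let acc := acc ++ [[i, x1]]
        if x2 != x1 then acc ++ [[i, x2]] else acc) []
      let bottom := (PySem.List.pyRange x1 (x2+1) 1).map (fun j => [y2, j])
      top ++ mid ++ bottom

-- ===== PRECONDITION & SPEC =====
-- Pre_ excludes only the empty image, on which Python A raises IndexError at image[0].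
def Pre_get_pixels_in_frame (image : List (List Int)) (x : Int) (y : Int) (rec_size : Int) : Prop := image ≠ []
instance (image : List (List Int)) (x : Int) (y : Int) (rec_size : Int) : Decidable (Pre_get_pixels_in_frame image x y rec_size) := by unfold Pre_get_pixels_in_frame; infer_instance
def pvWitness_get_pixels_in_frame : List (List Int) × Int × Int × Int := ([[0,0,0],[0,0,0],[0,0,0]], 1, 1, 1)

def Spec_get_pixels_in_frame (image : List (List Int)) (x : Int) (y : Int) (rec_size : Int) (out : List (List Int)) : Prop := out = get_pixels_in_frame_alt image x y rec_size
instance (image : List (List Int)) (x : Int) (y : Int) (rec_size : Int) (out : List (List Int)) : Decidable (Spec_get_pixels_in_frame image x y rec_size out) := by unfold Spec_get_pixels_in_frame; infer_instance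

-- ===== CLAIM (what is proved, stated in full; the proofs are below) =====
def Claim_equal_get_pixels_in_frame : Prop := ∀ (image : List (List Int)) (x : Int) (y : Int) (rec_size : Int), Dom_get_pixels_in_frame image x y rec_size → Pre_get_pixels_in_frame image x y rec_size → Spec_get_pixels_in_frame image x y rec_size (get_pixels_in_frame image x y rec_size)

-- ===== LEMMAS AND PROOFS =====

-- the endpoint filter of one interior row
lemma pv_filter_endpoints (x1 x2 : Int) (h : x1 ≤ x2) :
    (PySem.List.pyRange x1 (x2+1) 1).filter (fun j => j == x1 || j == x2) =
      if x1 = x2 then [x1] else [x1, x2] := by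
  rw [PySem.List.pyRange_one_cons (by omega)]
  by_cases hx : x1 = x2
  · subst hx
    rw [PySem.List.pyRange_one_eq_nil (by omega)]
    simp
  · have hlt : x1 < x2 := lt_of_le_of_ne h hx
    rw [PySem.List.pyRange_one_succ_right (by omega)]
    have hmid : (PySem.List.pyRange (x1+1) x2 1).filter (fun j => j == x1 || j == x2) = [] := by
      apply List.filter_eq_nil_iff.mpr
      intro j hj
      rw [PySem.List.mem_pyRange_one] at hj
      simp only [Bool.or_eq_true, beq_iff_eq, not_or]
      omega
    simp [List.filter_append, hmid, hx]

-- the core equality, for arbitrary rectangle bounds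
lemma pv_frame_core (x1 y1 x2 y2 : Int) :
    (PySem.List.pyRange y1 (y2+1) 1).foldl (fun pixels i =>
      (PySem.List.pyRange x1 (x2+1) 1).foldl (fun pixels j =>
        if i == y1 || i == y2 || j == x1 || j == x2 then pixels ++ [[i, j]] else pixels) pixels) []
    =
    (if y2 < y1 || x2 < x1 then ([] : List (List Int))
     else
       let top := (PySem.List.pyRange x1 (x2+1) 1).map (fun j => [y1, j])
       if y1 == y2 then top
       else
         let mid := (PySem.List.pyRange (y1+1) y2 1).foldl (fun acc i =>
           let acc := acc ++ [[i, x1]]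
           if x2 != x1 then acc ++ [[i, x2]] else acc) []
         let bottom := (PySem.List.pyRange x1 (x2+1) 1).map (fun j => [y2, j])
         top ++ mid ++ bottom) := by
  -- A-side becomes a flatMap of filtered rows
  have hA : ∀ init : List (List Int),
      (PySem.List.pyRange y1 (y2+1) 1).foldl (fun pixels i =>
        (PySem.List.pyRange x1 (x2+1) 1).foldl (fun pixels j =>
          if i == y1 || i == y2 || j == x1 || j == x2 then pixels ++ [[i, j]] else pixels) pixels) init
      = init ++ (PySem.List.pyRange y1 (y2+1) 1).flatMap (fun i =>
          ((PySem.List.pyRange x1 (x2+1) 1).filter (fun j => i == y1 || i == y2 || j == x1 || j == x2)).map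
            (fun j => [i, j])) := by
    intro init
    rw [show (fun pixels i =>
        (PySem.List.pyRange x1 (x2+1) 1).foldl (fun pixels j =>
          if i == y1 || i == y2 || j == x1 || j == x2 then pixels ++ [[i, j]] else pixels) pixels)
      = (fun (pixels : List (List Int)) i => pixels ++
          ((PySem.List.pyRange x1 (x2+1) 1).filter (fun j => i == y1 || i == y2 || j == x1 || j == x2)).map
            (fun j => [i, j])) from
      funext fun px => funext fun i => PySem.List.foldl_append_if _ _ _ _]
    exact PySem.List.foldl_append_eq_flatMap _ _ _
  rw [hA, List.nil_append]
  by_cases hy : y2 < y1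
  · rw [PySem.List.pyRange_one_eq_nil (show y2 + 1 ≤ y1 by omega)]
    simp [hy]
  · push_neg at hy
    by_cases hx : x2 < x1
    · rw [PySem.List.pyRange_one_eq_nil (show x2 + 1 ≤ x1 by omega)]
      simp [hx]
    · push_neg at hx
      have hif : (y2 < y1 || x2 < x1) = false := by simp; omega
      rw [hif]
      simp only [Bool.false_eq_true, if_false]
      by_cases hyy : y1 = y2
      · subst hyy
        rw [PySem.List.pyRange_one_singleton]
        simp
      · have hylt : y1 < y2 := lt_of_le_of_ne hy hyy
        have hcut : PySem.List.pyRange y1 (y2+1) 1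
            = y1 :: (PySem.List.pyRange (y1+1) y2 1 ++ [y2]) := by
          rw [PySem.List.pyRange_one_succ_right hy, PySem.List.pyRange_one_cons hylt]
          simp
        rw [hcut]
        simp only [List.flatMap_cons, List.flatMap_append, List.flatMap_cons, List.flatMap_nil,
          List.append_nil, beq_iff_eq, hyy, if_false]
        have hmidB : (PySem.List.pyRange (y1+1) y2 1).foldl (fun acc i =>
              let acc := acc ++ [[i, x1]]
              if x2 != x1 then acc ++ [[i, x2]] else acc) ([] : List (List Int))
            = (PySem.List.pyRange (y1+1) y2 1).flatMap
                (fun i => if x2 ≠ x1 then [[i, x1], [i, x2]] else [[i, x1]]) := by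
          rw [show (fun (acc : List (List Int)) i =>
              let acc := acc ++ [[i, x1]]
              if x2 != x1 then acc ++ [[i, x2]] else acc)
            = (fun (acc : List (List Int)) i => acc ++
                (if x2 ≠ x1 then [[i, x1], [i, x2]] else [[i, x1]])) from
            funext fun acc => funext fun i => by
              by_cases h : x2 = x1 <;> simp [h]]
          rw [PySem.List.foldl_append_eq_flatMap]
          simp
        rw [hmidB]
        have hrowtop : ((PySem.List.pyRange x1 (x2+1) 1).filter
            (fun j => y1 == y1 || y1 == y2 || j == x1 || j == x2)).map (fun j => [y1, j])
            = (PySem.List.pyRange x1 (x2+1) 1).map (fun j => [y1, j]) := by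
          congr 1
          apply List.filter_eq_self.mpr
          intro a _; simp
        have hrowbot : ((PySem.List.pyRange x1 (x2+1) 1).filter
            (fun j => y2 == y1 || y2 == y2 || j == x1 || j == x2)).map (fun j => [y2, j])
            = (PySem.List.pyRange x1 (x2+1) 1).map (fun j => [y2, j]) := by
          congr 1
          apply List.filter_eq_self.mpr
          intro a _; simp
        have hmidA : (PySem.List.pyRange (y1+1) y2 1).flatMap (fun i =>
              ((PySem.List.pyRange x1 (x2+1) 1).filter
                (fun j => i == y1 || i == y2 || j == x1 || j == x2)).map (fun j => [i, j]))
            = (PySem.List.pyRange (y1+1) y2 1).flatMap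
                (fun i => if x2 ≠ x1 then [[i, x1], [i, x2]] else [[i, x1]]) := by
          apply List.flatMap_congr
          intro i hi
          rw [PySem.List.mem_pyRange_one] at hi
          have h1 : (fun j => i == y1 || i == y2 || j == x1 || j == x2)
              = (fun j => j == x1 || j == x2) := by
            funext j
            have : (i == y1) = false := by simp; omega
            have h2 : (i == y2) = false := by simp; omega
            simp [this, h2]
          rw [h1, pv_filter_endpoints x1 x2 hx]
          by_cases hxx : x1 = x2 <;> simp [hxx, Ne.symm]
        rw [hrowtop, hrowbot, hmidA]
        simp [List.append_assoc]

-- ===== VERDICT (by name: the statement is the Claim_ definition above) =====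
theorem get_pixels_in_frame_spec : Claim_equal_get_pixels_in_frame := by
  intro image x y rec_size _ _
  unfold Spec_get_pixels_in_frame get_pixels_in_frame get_pixels_in_frame_alt get_surrounding_rectangle
  exact pv_frame_core _ _ _ _
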